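-- pv_equiv track=rewrite | github.com/brokenbartender/GEMOP | ramshare/skills/skill_market_theme_research.py | build_horizon_plan
-- ===== SOURCE A (Python) =====
-- from typing import Any, Dict, List, Tuple
--
-- def build_horizon_plan(theme: str, picks: List[Dict[str, Any]]) -> Dict[str, List[str]]:
--     top = [p for p in picks if str(p.get("stance")) == "buy_candidate"][:3]
--     watch = [p for p in picks if str(p.get("stance")) == "watch"][:5]
--     day = [
--         f"Theme run for '{theme}': premarket-check top candidates before placing orders.",
--         (
--             "Top buy candidates: " + ", ".join([f"{p['symbol']} (${p['price']})" for p in top])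
--             if top
--             else "No high-conviction buy candidate today; stay in watch mode."
--         ),
--         "Use only limit orders and define stop/target at entry.",
--     ]
--     week = [
--         "Re-run theme scan daily and update ranks based on fresh catalysts and momentum drift.",
--         "Scale into winners in 2-3 tranches; avoid full-size first entry.",
--         (
--             "Watchlist for rotation: " + ", ".join([p["symbol"] for p in watch[:4]])
--             if watch
--             else "No secondary watchlist symbols available this run."
--         ),
--     ]
--     month = [
--         "Keep a rolling scorecard: hit-rate, average win/loss, and thesis break reasons.",
--         "Drop symbols with repeated negative catalyst drift and weak liquidity.",
--         "Raise sizing only after sustained positive expectancy.",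
--     ]
--     return {"one_day": day, "one_week": week, "one_month": month}
-- ===== SOURCE B (Python) =====
-- from typing import Any, Dict, List
--
-- def build_horizon_plan(theme: str, picks: List[Dict[str, Any]]) -> Dict[str, List[str]]:
--     # Single pass with counters and early termination: collect the formatted
--     # strings directly instead of filtering pick lists and slicing afterwards.
--     top_parts: List[str] = []
--     watch_syms: List[str] = []
--     for p in picks:
--         if len(top_parts) >= 3 and len(watch_syms) >= 4:
--             break
--         stance = str(p.get("stance"))
--         if stance == "buy_candidate" and len(top_parts) < 3:
--             top_parts.append(f"{p['symbol']} (${p['price']})")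
--         elif stance == "watch" and len(watch_syms) < 4:
--             watch_syms.append(p["symbol"])
--     day = [
--         f"Theme run for '{theme}': premarket-check top candidates before placing orders.",
--         (
--             "Top buy candidates: " + ", ".join(top_parts)
--             if top_parts
--             else "No high-conviction buy candidate today; stay in watch mode."
--         ),
--         "Use only limit orders and define stop/target at entry.",
--     ]
--     week = [
--         "Re-run theme scan daily and update ranks based on fresh catalysts and momentum drift.",
--         "Scale into winners in 2-3 tranches; avoid full-size first entry.",
--         (
--             "Watchlist for rotation: " + ", ".join(watch_syms)
--             if watch_syms
--             else "No secondary watchlist symbols available this run."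
--         ),
--     ]
--     month = [
--         "Keep a rolling scorecard: hit-rate, average win/loss, and thesis break reasons.",
--         "Drop symbols with repeated negative catalyst drift and weak liquidity.",
--         "Raise sizing only after sustained positive expectancy.",
--     ]
--     return {"one_day": day, "one_week": week, "one_month": month}
-- ===== Notes on version B (the rewrite author's own statement) =====
-- stated objective: alternative
-- what changed: Replaces A's two filter-then-slice comprehension passes over picks (plus later mapping passes that format the selected picks) with a single loop carrying counters that appends the formatted output strings directly (at most 3 buy lines, 4 watch symbols) and breaks early once both quotas are full.
import Mathlib
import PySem

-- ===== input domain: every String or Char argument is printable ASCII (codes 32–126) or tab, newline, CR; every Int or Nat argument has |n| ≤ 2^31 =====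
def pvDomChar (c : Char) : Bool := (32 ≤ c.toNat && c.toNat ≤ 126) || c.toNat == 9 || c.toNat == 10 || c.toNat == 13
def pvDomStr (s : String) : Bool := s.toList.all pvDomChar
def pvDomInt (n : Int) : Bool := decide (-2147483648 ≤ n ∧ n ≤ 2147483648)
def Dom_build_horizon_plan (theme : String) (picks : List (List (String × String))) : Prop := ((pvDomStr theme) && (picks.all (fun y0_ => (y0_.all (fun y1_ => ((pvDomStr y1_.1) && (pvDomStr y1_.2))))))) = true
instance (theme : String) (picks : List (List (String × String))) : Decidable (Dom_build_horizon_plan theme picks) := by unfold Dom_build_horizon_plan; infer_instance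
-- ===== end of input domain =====

-- B replaces A's two filter-then-slice passes (and later per-pick formatting passes) with a
-- single counter-driven loop that collects the formatted strings directly and breaks early.

-- shared helpers, exact models of the Python expressions on the picks (dicts of strings):
-- str(p.get("stance")): the value itself if present (values are str), "None" if absent
def pvStance (p : List (String × String)) : String :=
  ((PySem.Dict.mk p).get? "stance").getD "None"
-- p["symbol"] / p["price"]: exact when the key is present (Pre_ guarantees this wherever evaluated)
def pvSym (p : List (String × String)) : String :=
  ((PySem.Dict.mk p).get? "symbol").getD ""
def pvPrice (p : List (String × String)) : String :=
  ((PySem.Dict.mk p).get? "price").getD ""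
-- the formatted line for one top pick
def pvFmt (p : List (String × String)) : String := pvSym p ++ " ($" ++ pvPrice p ++ ")"

def pvMonth : List String :=
  [ "Keep a rolling scorecard: hit-rate, average win/loss, and thesis break reasons.",
    "Drop symbols with repeated negative catalyst drift and weak liquidity.",
    "Raise sizing only after sustained positive expectancy." ]

-- ===== PORT A =====
-- A's blocks: conditionals test the selected pick lists, the joins map over them
def pvDayA (theme : String) (top : List (List (String × String))) : List String :=
  [ "Theme run for '" ++ theme ++ "': premarket-check top candidates before placing orders.",
    (if top ≠ [] then "Top buy candidates: " ++ PySem.Str.join ", " (top.map pvFmt)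
     else "No high-conviction buy candidate today; stay in watch mode."),
    "Use only limit orders and define stop/target at entry." ]
def pvWeekA (watch : List (List (String × String))) : List String :=
  [ "Re-run theme scan daily and update ranks based on fresh catalysts and momentum drift.",
    "Scale into winners in 2-3 tranches; avoid full-size first entry.",
    (if watch ≠ [] then "Watchlist for rotation: " ++ PySem.Str.join ", " ((watch.take 4).map pvSym)
     else "No secondary watchlist symbols available this run.") ]

def build_horizon_plan (theme : String) (picks : List (List (String × String))) : List (String × List String) :=
  let top := (picks.filter (fun p => pvStance p == "buy_candidate")).take 3
  let watch := (picks.filter (fun p => pvStance p == "watch")).take 5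
  [("one_day", pvDayA theme top), ("one_week", pvWeekA watch), ("one_month", pvMonth)]

-- ===== PORT B =====
-- the single pass: accumulate formatted strings with counters, break when both quotas full
def pvCollect : List (List (String × String)) → List String → List String → (List String × List String)
  | [], tops, watches => (tops, watches)
  | p :: ps, tops, watches =>
    if 3 ≤ tops.length ∧ 4 ≤ watches.length then (tops, watches)
    else
      let stance := pvStance p
      if stance == "buy_candidate" && decide (tops.length < 3) then
        pvCollect ps (tops ++ [pvFmt p]) watches
      else if stance == "watch" && decide (watches.length < 4) then
        pvCollect ps tops (watches ++ [pvSym p])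
      else pvCollect ps tops watches

-- B's blocks: conditionals and joins are over the already-formatted string lists
def pvDayB (theme : String) (top_parts : List String) : List String :=
  [ "Theme run for '" ++ theme ++ "': premarket-check top candidates before placing orders.",
    (if top_parts ≠ [] then "Top buy candidates: " ++ PySem.Str.join ", " top_parts
     else "No high-conviction buy candidate today; stay in watch mode."),
    "Use only limit orders and define stop/target at entry." ]
def pvWeekB (watch_syms : List String) : List String :=
  [ "Re-run theme scan daily and update ranks based on fresh catalysts and momentum drift.",
    "Scale into winners in 2-3 tranches; avoid full-size first entry.",
    (if watch_syms ≠ [] then "Watchlist for rotation: " ++ PySem.Str.join ", " watch_syms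
     else "No secondary watchlist symbols available this run.") ]

def build_horizon_plan_alt (theme : String) (picks : List (List (String × String))) : List (String × List String) :=
  let c := pvCollect picks [] []
  [("one_day", pvDayB theme c.1), ("one_week", pvWeekB c.2), ("one_month", pvMonth)]

-- ===== PRECONDITION & SPEC =====
-- Pre_ excludes exactly the inputs where Python A raises KeyError: a selected top buy
-- candidate lacking "symbol"/"price", or a joined watch pick lacking "symbol".
def Pre_build_horizon_plan (theme : String) (picks : List (List (String × String))) : Prop :=
  (∀ p ∈ (picks.filter (fun p => pvStance p == "buy_candidate")).take 3,
      ((PySem.Dict.mk p).get? "symbol").isSome ∧ ((PySem.Dict.mk p).get? "price").isSome) ∧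
  (∀ p ∈ ((picks.filter (fun p => pvStance p == "watch")).take 5).take 4,
      ((PySem.Dict.mk p).get? "symbol").isSome)
instance (theme : String) (picks : List (List (String × String))) : Decidable (Pre_build_horizon_plan theme picks) := by unfold Pre_build_horizon_plan; infer_instance

def pvWitness_build_horizon_plan : String × (List (List (String × String))) :=
  ("ai", [[("stance", "buy_candidate"), ("symbol", "NVDA"), ("price", "900")],
          [("stance", "watch"), ("symbol", "AMD")]])

def Spec_build_horizon_plan (theme : String) (picks : List (List (String × String))) (out : List (String × List String)) : Prop := out = build_horizon_plan_alt theme picks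
instance (theme : String) (picks : List (List (String × String))) (out : List (String × List String)) : Decidable (Spec_build_horizon_plan theme picks out) := by unfold Spec_build_horizon_plan; infer_instance

-- ===== CLAIM (what is proved, stated in full; the proofs are below) =====
def Claim_equal_build_horizon_plan : Prop := ∀ (theme : String) (picks : List (List (String × String))), Dom_build_horizon_plan theme picks → Pre_build_horizon_plan theme picks → Spec_build_horizon_plan theme picks (build_horizon_plan theme picks)

-- ===== LEMMAS AND PROOFS =====

-- invariant of the single pass: the result is the accumulators extended by the formatted
-- first (3 - |tops|) buy candidates and first (4 - |watches|) watch symbols of the rest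
lemma pvCollect_eq (ps : List (List (String × String))) (tops watches : List String) :
    pvCollect ps tops watches =
      (tops ++ (((ps.filter (fun p => pvStance p == "buy_candidate")).take (3 - tops.length)).map pvFmt),
       watches ++ (((ps.filter (fun p => pvStance p == "watch")).take (4 - watches.length)).map pvSym)) := by
  induction ps generalizing tops watches with
  | nil => simp [pvCollect]
  | cons p ps ih =>
      unfold pvCollect
      by_cases hfull : 3 ≤ tops.length ∧ 4 ≤ watches.length
      · have h3 : 3 - tops.length = 0 := by omega
        have h4 : 4 - watches.length = 0 := by omega
        simp [hfull, h3, h4]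
      · simp only [if_neg hfull]
        by_cases hb : pvStance p == "buy_candidate"
        · have hbw : ¬ (pvStance p == "watch") := by
            intro hw; rw [beq_iff_eq] at hb hw; rw [hb] at hw; exact absurd hw (by decide)
          by_cases hlt : tops.length < 3
          · simp only [hb, hlt, decide_true, Bool.and_true, if_true, ih, List.filter_cons,
              hbw]
            have : 3 - tops.length = (3 - (tops ++ [pvFmt p]).length) + 1 := by
              simp; omega
            simp [this, hb, hbw]
          · have h3 : 3 - tops.length = 0 := by omega
            simp only [hb, hlt, decide_false, Bool.and_false, ih, List.filter_cons]
            simp [h3, hbw]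
        · by_cases hw : pvStance p == "watch"
          · by_cases hlt : watches.length < 4
            · simp only [hb, Bool.false_and, hw, hlt, decide_true, Bool.and_true,
                if_true, ih, List.filter_cons]
              have : 4 - watches.length = (4 - (watches ++ [pvSym p]).length) + 1 := by
                simp; omega
              simp [this]
            · have h4 : 4 - watches.length = 0 := by omega
              simp only [hb, Bool.false_and, hw, hlt, decide_false, Bool.and_false,
                ih, List.filter_cons]
              simp [h4]
          · simp only [hb, Bool.false_and, hw, ih, List.filter_cons]
            simp

lemma day_key (theme : String) (l : List (List (String × String))) :
    pvDayB theme (l.map pvFmt) = pvDayA theme l := by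
  unfold pvDayA pvDayB
  by_cases h : l = [] <;> simp [h]

lemma week_key (l : List (List (String × String))) :
    pvWeekB ((l.take 4).map pvSym) = pvWeekA (l.take 5) := by
  unfold pvWeekA pvWeekB
  by_cases h : l = [] <;>
    simp [h, List.take_take, List.take_eq_nil_iff, List.map_eq_nil_iff]

theorem build_horizon_plan_spec : Claim_equal_build_horizon_plan := by
  intro theme picks _hdom _hpre
  unfold Spec_build_horizon_plan build_horizon_plan build_horizon_plan_alt
  rw [pvCollect_eq]
  simp only [List.length_nil, Nat.sub_zero, List.nil_append]
  rw [day_key, week_key]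

-- ===== VERDICT (by name: the statement is the Claim_ definition above) =====
-- (theorem above; witness sanity is checked by the grader via pvWitness_)
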